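-- pv_equiv track=rewrite | github.com/Clinical-Genomics/scout | scout/parse/variant/clnsig.py | parse_clnsig_low_penetrance
-- ===== SOURCE A (Python) =====
-- from typing import Dict, List, Optional, Union
--
-- def parse_clnsig_low_penetrance(sig_groups: List[str]) -> List[str]:
--     """If 'low_penetrance' is among the clnsig terms of an array, the term gets appended to the term immediately before in the array."""
--     result = []
--     for sig in sig_groups:
--         if sig == "low_penetrance" and result:
--             result[-1] += f",{sig}"
--         else:
--             result.append(sig)
--     return result
-- ===== SOURCE B (Python) =====
-- def parse_clnsig_low_penetrance(sig_groups):
--     """Detect maximal runs [group-opener, following 'low_penetrance' terms] with two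
--     index pointers, then emit each run joined with commas."""
--     out = []
--     i = 0
--     n = len(sig_groups)
--     while i < n:
--         j = i + 1
--         while j < n and sig_groups[j] == "low_penetrance":
--             j += 1
--         out.append(",".join(sig_groups[i:j]))
--         i = j
--     return out
-- ===== Notes on version B (the rewrite author's own statement) =====
-- stated objective: alternative
-- what changed: Replaces A's fold that repeatedly mutates the last result string with a two-pointer run scan: each maximal run (opener plus following 'low_penetrance' terms) is located by index and emitted once via ','.join, so no result element is ever rewritten.
import Mathlib
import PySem

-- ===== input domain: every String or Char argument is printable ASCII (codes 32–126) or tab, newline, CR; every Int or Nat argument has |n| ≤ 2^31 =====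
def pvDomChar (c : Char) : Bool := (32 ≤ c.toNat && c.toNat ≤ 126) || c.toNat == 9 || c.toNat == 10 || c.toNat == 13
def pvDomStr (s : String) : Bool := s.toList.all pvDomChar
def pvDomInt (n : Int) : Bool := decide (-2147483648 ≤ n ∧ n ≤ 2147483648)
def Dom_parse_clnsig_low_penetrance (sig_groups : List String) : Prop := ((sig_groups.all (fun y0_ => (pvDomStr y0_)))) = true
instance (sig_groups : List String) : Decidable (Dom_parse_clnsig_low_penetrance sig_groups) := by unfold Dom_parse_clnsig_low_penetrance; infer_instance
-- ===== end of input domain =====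

-- B replaces A's fold that mutates the last result string with a two-pointer run
-- scan emitting each comma-joined run once (objective: alternative structure).

-- ===== PORT A =====
-- exact port of Python's str '+' (concatenation), via List Char so the kernel reduces it
def pvStrCat (a b : String) : String := String.ofList (a.toList ++ b.toList)

-- the body of A's for-loop: result[-1] += f",{sig}"  /  result.append(sig)
def pvStepA (result : List String) (sig : String) : List String :=
  if sig == "low_penetrance" && !result.isEmpty then
    result.dropLast ++ [pvStrCat (result.getLastD "") (pvStrCat "," sig)]
  else
    result ++ [sig]

def parse_clnsig_low_penetrance (sig_groups : List String) : List String :=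
  sig_groups.foldl pvStepA []

-- ===== PORT B =====
-- Source B's outer while-loop: one step per run; the inner while computing j is the
-- takeWhile/dropWhile split of the tail at the 'low_penetrance' predicate.
def parse_clnsig_low_penetrance_alt : List String → List String
  | [] => []
  | x :: rest =>
    PySem.Str.join "," (x :: rest.takeWhile (· == "low_penetrance"))
      :: parse_clnsig_low_penetrance_alt (rest.dropWhile (· == "low_penetrance"))
  termination_by l => l.length
  decreasing_by
    exact Nat.lt_succ_of_le (List.length_dropWhile_le _ _)

-- ===== PRECONDITION & SPEC =====
def Spec_parse_clnsig_low_penetrance (sig_groups : List String) (out : List String) : Prop := out = parse_clnsig_low_penetrance_alt sig_groups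
instance (sig_groups : List String) (out : List String) : Decidable (Spec_parse_clnsig_low_penetrance sig_groups out) := by unfold Spec_parse_clnsig_low_penetrance; infer_instance

-- ===== CLAIM (what is proved, stated in full; the proofs are below) =====
def Claim_equal_parse_clnsig_low_penetrance : Prop := ∀ (sig_groups : List String), Dom_parse_clnsig_low_penetrance sig_groups → Spec_parse_clnsig_low_penetrance sig_groups (parse_clnsig_low_penetrance sig_groups)

-- ===== LEMMAS AND PROOFS =====

-- A's step on a nonempty accumulator only touches the last element
theorem pvStepA_concat (acc : List String) (a x : String) :
    pvStepA (acc ++ [a]) x = acc ++ pvStepA [a] x := by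
  by_cases h : x = "low_penetrance"
  · simp [pvStepA, h]
  · simp [pvStepA, h]

-- hence A's whole fold from a singleton accumulator never touches a prefix
theorem pvFoldA_concat (xs : List String) (acc : List String) (a : String) :
    xs.foldl pvStepA (acc ++ [a]) = acc ++ xs.foldl pvStepA [a] := by
  induction xs generalizing acc a with
  | nil => simp
  | cons x xs ih =>
    rw [List.foldl_cons, List.foldl_cons, pvStepA_concat]
    by_cases h : x = "low_penetrance"
    · have hx : pvStepA [a] x = [pvStrCat a (pvStrCat "," x)] := by simp [pvStepA, h]
      rw [hx]; exact ih acc _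
    · have hx : pvStepA [a] x = [a] ++ [x] := by simp [pvStepA, h]
      rw [hx, ← List.append_assoc, ih (acc ++ [a]) x, ih [a] x, List.append_assoc]

-- A's first loop iteration just seeds the accumulator with the head
theorem pvFoldA_nil_cons (y : String) (ys : List String) :
    (y :: ys).foldl pvStepA [] = ys.foldl pvStepA [y] := by
  rw [List.foldl_cons]
  simp [pvStepA]

-- gluing a run: ','.join absorbs a piece already comma-concatenated on the left
theorem chars_join_merge (sep p q : List Char) (rest : List (List Char)) :
    PySem.Chars.join sep ((p ++ sep ++ q) :: rest)
      = PySem.Chars.join sep (p :: q :: rest) := by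
  cases rest with
  | nil => simp [PySem.Chars.join_singleton, PySem.Chars.join_cons_cons]
  | cons r rs => simp [PySem.Chars.join_cons_cons]

theorem join_absorb (a l : String) (lps : List String) :
    PySem.Str.join "," (pvStrCat a (pvStrCat "," l) :: lps)
      = PySem.Str.join "," (a :: l :: lps) := by
  apply String.toList_inj.mp
  simp only [PySem.Str.toList_join, List.map_cons, pvStrCat, String.toList_ofList]
  rw [← List.append_assoc, chars_join_merge]

-- A's fold consumes a 'low_penetrance' run by comma-extending its single accumulator
theorem pvFoldA_lp (lps : List String) (hlp : ∀ s ∈ lps, s = "low_penetrance")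
    (a : String) (xs : List String) :
    (lps ++ xs).foldl pvStepA [a] = xs.foldl pvStepA [PySem.Str.join "," (a :: lps)] := by
  induction lps generalizing a with
  | nil =>
    have hja : PySem.Str.join "," [a] = a := by
      apply String.toList_inj.mp
      simp [PySem.Str.toList_join, PySem.Chars.join_singleton]
    rw [List.nil_append, hja]
  | cons l ls ih =>
    have hl : l = "low_penetrance" := hlp l (by simp)
    have hstep : pvStepA [a] l = [pvStrCat a (pvStrCat "," l)] := by
      simp [pvStepA, hl]
    rw [List.cons_append, List.foldl_cons, hstep,
      ih (fun s hs => hlp s (by simp [hs])) (pvStrCat a (pvStrCat "," l)), join_absorb]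

-- main equivalence, following B's run-recursion
theorem pvFoldA_eq_alt (xs : List String) :
    xs.foldl pvStepA [] = parse_clnsig_low_penetrance_alt xs := by
  induction xs using parse_clnsig_low_penetrance_alt.induct with
  | case1 => rw [parse_clnsig_low_penetrance_alt]; rfl
  | case2 x rest ih =>
    rw [parse_clnsig_low_penetrance_alt, pvFoldA_nil_cons]
    have hlp : ∀ s ∈ rest.takeWhile (· == "low_penetrance"), s = "low_penetrance" := by
      intro s hs
      simpa using List.mem_takeWhile_imp (l := rest) (p := (· == "low_penetrance")) hs
    have key : rest.foldl pvStepA [x]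
        = (rest.dropWhile (· == "low_penetrance")).foldl pvStepA
            [PySem.Str.join "," (x :: rest.takeWhile (· == "low_penetrance"))] := by
      conv_lhs => rw [← List.takeWhile_append_dropWhile (p := (· == "low_penetrance")) (l := rest)]
      exact pvFoldA_lp _ hlp x _
    rw [key]
    have hhead := List.head?_dropWhile_not (· == "low_penetrance") rest
    generalize hzs : rest.dropWhile (· == "low_penetrance") = zs at ih hhead ⊢
    cases zs with
    | nil =>
      rw [show parse_clnsig_low_penetrance_alt [] = [] from by rw [parse_clnsig_low_penetrance_alt]]
      rfl
    | cons y ys =>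
      have hy : (y == "low_penetrance") = false := by
        simp [List.head?] at hhead
        simpa using hhead
      have hstep : pvStepA
          [PySem.Str.join "," (x :: rest.takeWhile (· == "low_penetrance"))] y
          = [PySem.Str.join "," (x :: rest.takeWhile (· == "low_penetrance"))] ++ [y] := by
        simp [pvStepA, hy]
      rw [List.foldl_cons, hstep, pvFoldA_concat, ← pvFoldA_nil_cons, ih]
      rfl

-- ===== VERDICT (by name: the statement is the Claim_ definition above) =====
theorem parse_clnsig_low_penetrance_spec : Claim_equal_parse_clnsig_low_penetrance := by
  intro sig_groups _
  unfold Spec_parse_clnsig_low_penetrance parse_clnsig_low_penetrance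
  exact pvFoldA_eq_alt sig_groups
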